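-- pv_equiv track=rewrite | github.com/yichennliu/triplets_generator | postprocessing.py | match_keyword
-- ===== SOURCE A (Python) =====
-- from collections import defaultdict
--
-- def match_keyword(result, keywords):
--     words = defaultdict(int)
--     matching_e1 = defaultdict(int)
--     matching_e2 = defaultdict(int)
--     combined_matching = defaultdict(int)  # triplets that have keywords both in subject and object
--
--     for articles in keywords:
--         for a in articles:
--             words[a] += 1
--
--     for word in words:
--
--         if len(word) > 1:
--             w = word.split()
--             for (e1, r, e2) in result:
--                 m1 = all([k in e1 for k in w])
--                 m2 = all([voc in e2 for voc in w])
--                 if m1 == True: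
--                     matching_e1[(e1, r, e2)] += 1
--                 if m2 == True:
--                     matching_e2[(e1, r, e2)] += 1
--
--         else:
--
--             for (e1, r, e2) in result:
--                 m1 = all([k in e1 for k in word])
--                 m2 = all([voc in e2 for voc in word])
--                 if m1 == True:
--                     matching_e1[(e1, r, e2)] += 1
--                 if m2 == True:
--                     matching_e2[(e1, r, e2)] += 1
--
--     matching_set1 = set(matching_e1)
--     matching_set2 = set(matching_e2)
--
--     for trip in matching_set1.intersection(matching_set2):
--         combined_matching[trip] += matching_e2[trip]
--
--     return combined_matching
-- ===== SOURCE B (Python) =====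
-- from collections import defaultdict
--
-- def match_keyword(result, keywords):
--     words = defaultdict(int)
--     for articles in keywords:
--         for a in articles:
--             words[a] += 1
--
--     token_lists = [w.split() if len(w) > 1 else list(w) for w in words]
--
--     counts = defaultdict(int)
--     order = []
--     for e1, r, e2 in result:
--         if (e1, r, e2) not in counts:
--             order.append((e1, r, e2))
--         counts[(e1, r, e2)] += 1
--
--     combined = defaultdict(int)
--     for e1, r, e2 in order:
--         c1 = sum(1 for toks in token_lists if all(k in e1 for k in toks))
--         c2 = sum(1 for toks in token_lists if all(k in e2 for k in toks))
--         if c1 and c2: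
--             combined[(e1, r, e2)] = c2 * counts[(e1, r, e2)]
--     return combined
-- ===== Notes on version B (the rewrite author's own statement) =====
-- stated objective: alternative
-- what changed: B drops A's two per-word match dicts and the set-intersection post-pass: it precomputes each distinct word's token list, builds a triplet count table and first-occurrence order in one pass over result, then a single scan over the distinct triplets counts matching words for subject and object and emits c2 * multiplicity.
import Mathlib
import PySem

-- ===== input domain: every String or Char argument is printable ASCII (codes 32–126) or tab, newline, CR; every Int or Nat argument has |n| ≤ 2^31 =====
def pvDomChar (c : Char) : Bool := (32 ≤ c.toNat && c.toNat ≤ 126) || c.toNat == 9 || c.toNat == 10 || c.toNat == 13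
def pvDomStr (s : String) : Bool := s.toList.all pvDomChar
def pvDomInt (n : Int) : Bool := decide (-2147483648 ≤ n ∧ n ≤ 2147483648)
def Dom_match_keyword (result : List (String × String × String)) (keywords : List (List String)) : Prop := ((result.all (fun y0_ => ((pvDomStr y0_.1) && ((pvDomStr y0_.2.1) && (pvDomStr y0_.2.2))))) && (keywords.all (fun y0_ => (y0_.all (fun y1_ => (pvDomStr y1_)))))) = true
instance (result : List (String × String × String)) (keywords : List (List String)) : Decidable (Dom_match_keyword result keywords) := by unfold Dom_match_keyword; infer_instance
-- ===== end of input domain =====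

-- B replaces A's two per-word match dicts and the set-intersection post-pass with a one-pass
-- triplet count table plus a single scan over the distinct triplets (objective: alternative).
-- Both programs return a dict; Python iterates the intersection SET in unspecified hash order and dict
-- outputs compare order-insensitively, so both ports emit the triplets in first-occurrence order of `result`.

-- ===== PORT A =====
-- the body of A's inner `for (e1, r, e2) in result` loop (identical in both branches of A's `if`),
-- updating the pair (matching_e1, matching_e2); `toks` is `word.split()` resp. the list of chars of `word`
def pvStepA (toks : List String)
    (p : PySem.Dict (String × String × String) Int × PySem.Dict (String × String × String) Int)
    (t : String × String × String) :
    PySem.Dict (String × String × String) Int × PySem.Dict (String × String × String) Int :=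
  let m1 := toks.all (fun k => PySem.Str.isIn k t.1)
  let m2 := toks.all (fun voc => PySem.Str.isIn voc t.2.2)
  (if m1 then p.1.modify t 0 (· + 1) else p.1,
   if m2 then p.2.modify t 0 (· + 1) else p.2)

def match_keyword (result : List (String × String × String)) (keywords : List (List String)) : List (String × String × String × Int) :=
  -- words[a] += 1
  let words : PySem.Dict String Int :=
    keywords.foldl (fun d articles => articles.foldl (fun d a => d.modify a 0 (· + 1)) d) PySem.Dict.empty
  -- for word in words: … two branches, each running the same loop over result
  let m := words.keys.foldl (fun p word =>
      if PySem.Str.len word > 1 then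
        result.foldl (pvStepA (PySem.Str.split₀ word)) p
      else
        result.foldl (pvStepA (word.toList.map String.singleton)) p)
    (PySem.Dict.empty, PySem.Dict.empty)
  let set1 : PySem.Set (String × String × String) := PySem.Set.ofList m.1.keys
  let set2 : PySem.Set (String × String × String) := PySem.Set.ofList m.2.keys
  let inter := PySem.Set.inter set1 set2
  -- Python iterates set1.intersection(set2) in unspecified hash order and the returned dict compares
  -- order-insensitively; the port fixes that iteration order to first occurrence in `result`
  -- (every member of the intersection is a triplet of `result`).
  let combined := ((PySem.List.dedup result).filter (fun t => PySem.Set.contains inter t)).foldl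
      (fun d t => d.modify t 0 (· + m.2.getD t 0)) PySem.Dict.empty
  combined.items.map (fun p => (p.1.1, p.1.2.1, p.1.2.2, p.2))

-- ===== PORT B =====
def match_keyword_alt (result : List (String × String × String)) (keywords : List (List String)) : List (String × String × String × Int) :=
  -- words[a] += 1
  let words : PySem.Dict String Int :=
    keywords.foldl (fun d articles => articles.foldl (fun d a => d.modify a 0 (· + 1)) d) PySem.Dict.empty
  -- token_lists = [w.split() if len(w) > 1 else list(w) for w in words]
  let tokenLists := words.keys.map (fun w =>
      if PySem.Str.len w > 1 then PySem.Str.split₀ w else w.toList.map String.singleton)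
  -- one pass over result: counts[trip] += 1, order of first occurrences
  let co := result.foldl
      (fun (p : PySem.Dict (String × String × String) Int × List (String × String × String)) t =>
        (p.1.modify t 0 (· + 1), if p.1.contains t then p.2 else p.2 ++ [t]))
      (PySem.Dict.empty, [])
  -- single scan over the distinct triplets
  let combined := co.2.foldl (fun d t =>
      let c1 : Int := tokenLists.countP (fun toks => toks.all (fun k => PySem.Str.isIn k t.1))
      let c2 : Int := tokenLists.countP (fun toks => toks.all (fun k => PySem.Str.isIn k t.2.2))
      if c1 ≠ 0 ∧ c2 ≠ 0 then d.insert t (c2 * co.1.getD t 0) else d) PySem.Dict.empty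
  combined.items.map (fun p => (p.1.1, p.1.2.1, p.1.2.2, p.2))

-- ===== PRECONDITION & SPEC =====
def Spec_match_keyword (result : List (String × String × String)) (keywords : List (List String)) (out : List (String × String × String × Int)) : Prop := out = match_keyword_alt result keywords
instance (result : List (String × String × String)) (keywords : List (List String)) (out : List (String × String × String × Int)) : Decidable (Spec_match_keyword result keywords out) := by unfold Spec_match_keyword; infer_instance

-- ===== CLAIM (what is proved, stated in full; the proofs are below) =====
def Claim_equal_match_keyword : Prop := ∀ (result : List (String × String × String)) (keywords : List (List String)), Dom_match_keyword result keywords → Spec_match_keyword result keywords (match_keyword result keywords)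

-- ===== LEMMAS AND PROOFS =====

-- the token list A derives from a keyword: word.split() if len(word) > 1 else list(word)
def pvTok (w : String) : List String :=
  if PySem.Str.len w > 1 then PySem.Str.split₀ w else w.toList.map String.singleton

-- "word w matches the subject / the object of triplet t"
def pvM1 (w : String) (t : String × String × String) : Bool :=
  (pvTok w).all (fun k => PySem.Str.isIn k t.1)
def pvM2 (w : String) (t : String × String × String) : Bool :=
  (pvTok w).all (fun voc => PySem.Str.isIn voc t.2.2)

-- A's if/else both run the same loop, only with different token lists
lemma pvBranch_eq (result : List (String × String × String)) (word : String)
    (p : PySem.Dict (String × String × String) Int × PySem.Dict (String × String × String) Int) :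
    (if PySem.Str.len word > 1 then
        result.foldl (pvStepA (PySem.Str.split₀ word)) p
      else
        result.foldl (pvStepA (word.toList.map String.singleton)) p)
    = result.foldl (pvStepA (pvTok word)) p := by
  unfold pvTok; split <;> rfl

-- the paired inner fold is two independent dict folds
lemma pvStepA_fold (toks : List String) (result : List (String × String × String))
    (p : PySem.Dict (String × String × String) Int × PySem.Dict (String × String × String) Int) :
    result.foldl (pvStepA toks) p =
      (result.foldl (fun d t => if toks.all (fun k => PySem.Str.isIn k t.1) then d.modify t 0 (· + 1) else d) p.1,
       result.foldl (fun d t => if toks.all (fun voc => PySem.Str.isIn voc t.2.2) then d.modify t 0 (· + 1) else d) p.2) := by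
  induction result generalizing p with
  | nil => rfl
  | cons x xs ih => simp only [List.foldl_cons, pvStepA, ih]

-- one conditional counting pass: value at t
lemma pv_getD_condCount (f : (String × String × String) → Bool) (l : List (String × String × String))
    (d : PySem.Dict (String × String × String) Int) (t : String × String × String) :
    (l.foldl (fun d x => if f x then d.modify x 0 (· + 1) else d) d).getD t 0
      = d.getD t 0 + (if f t then (l.count t : Int) else 0) := by
  induction l generalizing d with
  | nil => simp
  | cons x xs ih =>
    simp only [List.foldl_cons, ih, List.count_cons]
    by_cases hx : f x
    · simp only [hx, if_true, PySem.Dict.getD_modify]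
      by_cases ht : t = x
      · subst ht; simp [hx]; ring
      · simp [ht, Ne.symm ht]
    · simp only [hx]
      by_cases ht : t = x
      · subst ht; simp [hx]
      · simp [Ne.symm ht]

-- one conditional counting pass: key membership
lemma pv_contains_condCount (f : (String × String × String) → Bool) (l : List (String × String × String))
    (d : PySem.Dict (String × String × String) Int) (t : String × String × String) :
    (l.foldl (fun d x => if f x then d.modify x 0 (· + 1) else d) d).contains t
      = (d.contains t || (f t && l.contains t)) := by
  induction l generalizing d with
  | nil => simp
  | cons x xs ih =>
    simp only [List.foldl_cons, ih]
    by_cases hx : f x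
    · simp only [hx, if_true, PySem.Dict.contains_modify]
      by_cases ht : t = x
      · subst ht; simp [hx]
      · have hbx : (t == x) = false := beq_eq_false_iff_ne.mpr ht
        simp [hbx, ht]
    · simp only [hx]
      by_cases ht : t = x
      · subst ht; simp [hx]
      · simp [ht]

-- A's whole word loop, one side at a time: value at t
lemma pv_getD_outer (g : String → (String × String × String) → Bool) (ws : List String)
    (result : List (String × String × String)) (d : PySem.Dict (String × String × String) Int)
    (t : String × String × String) :
    (ws.foldl (fun d w => result.foldl (fun d x => if g w x then d.modify x 0 (· + 1) else d) d) d).getD t 0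
      = d.getD t 0 + (ws.countP (fun w => g w t) : Int) * result.count t := by
  induction ws generalizing d with
  | nil => simp
  | cons w ws ih =>
    simp only [List.foldl_cons, ih, pv_getD_condCount, List.countP_cons]
    by_cases hw : g w t <;> simp [hw] <;> try ring

-- A's whole word loop, one side at a time: key membership
lemma pv_contains_outer (g : String → (String × String × String) → Bool) (ws : List String)
    (result : List (String × String × String)) (d : PySem.Dict (String × String × String) Int)
    (t : String × String × String) :
    (ws.foldl (fun d w => result.foldl (fun d x => if g w x then d.modify x 0 (· + 1) else d) d) d).contains t
      = (d.contains t || (ws.any (fun w => g w t) && result.contains t)) := by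
  induction ws generalizing d with
  | nil => simp
  | cons w ws ih =>
    simp only [List.foldl_cons, ih, pv_contains_condCount, List.any_cons]
    by_cases hw : g w t
    · cases hr : (result.contains t) <;> simp [hw, hr]
    · simp [hw]

-- B's single pass builds Counter(result) and the first-occurrence order
lemma pv_co_spec (xs ys : List (String × String × String)) :
    xs.foldl
      (fun (p : PySem.Dict (String × String × String) Int × List (String × String × String)) t =>
        (p.1.modify t 0 (· + 1), if p.1.contains t then p.2 else p.2 ++ [t]))
      (PySem.Dict.counter ys, PySem.Set.ofList ys)
    = (PySem.Dict.counter (ys ++ xs), PySem.Set.ofList (ys ++ xs)) := by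
  induction xs generalizing ys with
  | nil => simp
  | cons x xs ih =>
    have h1 : (PySem.Dict.counter ys).modify x 0 (· + 1) = PySem.Dict.counter (ys ++ [x]) := by
      rw [PySem.Dict.counter_append_singleton]
    have h2 : (if (PySem.Dict.counter ys).contains x then PySem.Set.ofList ys
                else PySem.Set.ofList ys ++ [x]) = PySem.Set.ofList (ys ++ [x]) := by
      have : PySem.Set.ofList (ys ++ [x]) = PySem.Set.add (PySem.Set.ofList ys) x := by
        simp [PySem.Set.ofList_eq_foldl, List.foldl_append]
      rw [this, PySem.Set.add_eq_ite, PySem.Dict.contains_counter]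
      by_cases hx : x ∈ ys
      · simp [hx]
      · simp [hx]
    simp only [List.foldl_cons, h1, h2, ih, List.append_assoc, List.singleton_append]

-- a loop writing fresh distinct keys with `d[t] += f t` appends its items
lemma pv_items_foldl_modifyAdd (l : List (String × String × String))
    (f : (String × String × String) → Int) (d : PySem.Dict (String × String × String) Int)
    (hn : l.Nodup) (hf : ∀ t ∈ l, d.contains t = false) :
    (l.foldl (fun d t => d.modify t 0 (· + f t)) d).items = d.items ++ l.map (fun t => (t, f t)) := by
  induction l generalizing d with
  | nil => simp
  | cons x xs ih =>
    have hx : d.contains x = false := hf x (by simp)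
    have hmod : d.modify x 0 (· + f x) = d.insert x (d.getD x 0 + f x) := PySem.Dict.ext_iff.mpr rfl
    simp only [List.foldl_cons, hmod]
    rw [ih _ (List.Nodup.of_cons hn)]
    · rw [PySem.Dict.items_insert_of_not_contains _ _ hx]
      simp [PySem.Dict.getD_of_not_contains _ _ hx]
    · intro t ht
      rw [PySem.Dict.contains_insert]
      have : t ≠ x := by
        rintro rfl; exact (List.nodup_cons.mp hn).1 ht
      simp [this, hf t (by simp [ht])]

-- a loop writing fresh distinct keys under a condition appends the filtered items
lemma pv_items_foldl_insertIf (l : List (String × String × String))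
    (q : (String × String × String) → Prop) [DecidablePred q] (f : (String × String × String) → Int)
    (d : PySem.Dict (String × String × String) Int)
    (hn : l.Nodup) (hf : ∀ t ∈ l, d.contains t = false) :
    (l.foldl (fun d t => if q t then d.insert t (f t) else d) d).items
      = d.items ++ (l.filter (fun t => decide (q t))).map (fun t => (t, f t)) := by
  induction l generalizing d with
  | nil => simp
  | cons x xs ih =>
    have hx : d.contains x = false := hf x (by simp)
    simp only [List.foldl_cons, List.filter_cons]
    by_cases hq : q x
    · simp only [hq, if_true]
      rw [ih _ (List.Nodup.of_cons hn)]
      · rw [PySem.Dict.items_insert_of_not_contains _ _ hx]; simp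
      · intro t ht
        rw [PySem.Dict.contains_insert]
        have : t ≠ x := by rintro rfl; exact (List.nodup_cons.mp hn).1 ht
        simp [this, hf t (by simp [ht])]
    · simp only [hq, if_false]
      exact ih _ (List.Nodup.of_cons hn) (fun t ht => hf t (by simp [ht]))

-- countP ≠ 0 ↔ any (on Int casts)
lemma pv_countP_ne_zero (ws : List String) (p : String → Bool) :
    ((ws.countP p : Int) ≠ 0) ↔ ws.any p = true := by
  rw [List.any_eq_true]
  constructor
  · intro h
    by_contra hc
    push Not at hc
    have : ws.countP p = 0 := List.countP_eq_zero.mpr (fun a ha => by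
      intro hpa; exact hc a ha hpa)
    simp [this] at h
  · rintro ⟨a, ha, hpa⟩ h
    have := List.countP_eq_zero.mp (by exact_mod_cast h)
    exact this a ha hpa

-- ===== VERDICT (by name: the statement is the Claim_ definition above) =====
theorem match_keyword_spec : Claim_equal_match_keyword := by
  intro result keywords _
  unfold Spec_match_keyword match_keyword match_keyword_alt
  simp only []
  generalize (keywords.foldl (fun d articles => articles.foldl (fun d a => d.modify a 0 (· + 1)) d)
      PySem.Dict.empty : PySem.Dict String Int) = W
  generalize W.keys = ws
  -- A's word loop, split into its two dict components
  have hbranch : ∀ (p : PySem.Dict (String × String × String) Int × PySem.Dict (String × String × String) Int),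
      ws.foldl (fun p word =>
        if PySem.Str.len word > 1 then
          result.foldl (pvStepA (PySem.Str.split₀ word)) p
        else
          result.foldl (pvStepA (word.toList.map String.singleton)) p) p
      = (ws.foldl (fun d w => result.foldl (fun d x => if pvM1 w x then d.modify x 0 (· + 1) else d) d) p.1,
         ws.foldl (fun d w => result.foldl (fun d x => if pvM2 w x then d.modify x 0 (· + 1) else d) d) p.2) := by
    induction ws with
    | nil => intro p; rfl
    | cons w ws ih =>
      intro p
      rw [List.foldl_cons, List.foldl_cons, List.foldl_cons, pvBranch_eq, pvStepA_fold, ih]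
      rfl
  rw [hbranch]
  -- B's counting pass builds Counter(result) and the first-occurrence order
  have hco : result.foldl
      (fun (p : PySem.Dict (String × String × String) Int × List (String × String × String)) t =>
        (p.1.modify t 0 (· + 1), if p.1.contains t then p.2 else p.2 ++ [t]))
      (PySem.Dict.empty, [])
      = (PySem.Dict.counter result, PySem.Set.ofList result) := pv_co_spec result []
  rw [hco]
  dsimp only
  simp only [PySem.List.dedup_eq_ofList]
  -- name the two sides of A's matching pair
  rw [pv_items_foldl_modifyAdd _ _ _
      (List.Nodup.filter _ (PySem.Set.nodup_ofList result))
      (fun t _ => PySem.Dict.contains_empty t)]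
  rw [pv_items_foldl_insertIf _ _ _ _
      (PySem.Set.nodup_ofList result)
      (fun t _ => PySem.Dict.contains_empty t)]
  have hemp : (PySem.Dict.empty : PySem.Dict (String × String × String) Int).items = [] := rfl
  simp only [hemp, List.nil_append]
  -- the two filters agree pointwise on the distinct triplets of result …
  have hfil : List.filter
      (fun t => (PySem.Set.inter
          (PySem.Set.ofList (ws.foldl (fun d w => result.foldl (fun d x => if pvM1 w x then d.modify x 0 (· + 1) else d) d) (PySem.Dict.empty : PySem.Dict (String × String × String) Int)).keys)
          (PySem.Set.ofList (ws.foldl (fun d w => result.foldl (fun d x => if pvM2 w x then d.modify x 0 (· + 1) else d) d) (PySem.Dict.empty : PySem.Dict (String × String × String) Int)).keys)).contains t)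
      (PySem.Set.ofList result)
      = List.filter
      (fun t => decide ((((ws.map (fun w => if PySem.Str.len w > 1 then PySem.Str.split₀ w else w.toList.map String.singleton)).countP (fun toks => toks.all (fun k => PySem.Str.isIn k t.1)) : Int) ≠ 0) ∧
                        (((ws.map (fun w => if PySem.Str.len w > 1 then PySem.Str.split₀ w else w.toList.map String.singleton)).countP (fun toks => toks.all (fun k => PySem.Str.isIn k t.2.2)) : Int) ≠ 0)))
      (PySem.Set.ofList result) := by
    apply List.filter_congr
    intro t ht
    have htr : t ∈ result := (PySem.Set.mem_ofList result t).mp ht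
    have h1 : ((ws.map (fun w => if PySem.Str.len w > 1 then PySem.Str.split₀ w else w.toList.map String.singleton)).countP (fun toks => toks.all (fun k => PySem.Str.isIn k t.1)) : Int) ≠ 0
        ↔ ws.any (fun w => pvM1 w t) = true := by
      rw [List.countP_map]
      exact pv_countP_ne_zero ws (fun w => pvM1 w t)
    have h2 : ((ws.map (fun w => if PySem.Str.len w > 1 then PySem.Str.split₀ w else w.toList.map String.singleton)).countP (fun toks => toks.all (fun k => PySem.Str.isIn k t.2.2)) : Int) ≠ 0
        ↔ ws.any (fun w => pvM2 w t) = true := by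
      rw [List.countP_map]
      exact pv_countP_ne_zero ws (fun w => pvM2 w t)
    rw [Bool.eq_iff_iff, decide_eq_true_eq, h1, h2]
    rw [PySem.Set.contains_iff, PySem.Set.mem_inter, PySem.Set.mem_ofList, PySem.Set.mem_ofList,
        ← PySem.Dict.contains_iff_mem_keys, ← PySem.Dict.contains_iff_mem_keys]
    rw [pv_contains_outer pvM1 ws result PySem.Dict.empty t,
        pv_contains_outer pvM2 ws result PySem.Dict.empty t,
        PySem.Dict.contains_empty]
    simp [htr]
  rw [hfil]
  -- … and the two value functions agree everywhere
  apply congrArg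
  apply List.map_congr_left
  intro t _
  rw [pv_getD_outer pvM2 ws result PySem.Dict.empty t, PySem.Dict.getD_empty,
      PySem.Dict.getD_counter, List.countP_map]
  rw [zero_add]
  rfl
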